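-- pv_equiv track=rewrite | github.com/liskos/kudryshov | ege23/123.py | f
-- ===== SOURCE A (Python) =====
-- def f(a):
--     x = [a]
--     for _ in range(5):
--         y = []
--         for g in x:
--             y.append(g+1)
--             y.append(g*2)
--             y.append(g + g % 4)
--         x = x + y
--     return 80 in x
-- ===== SOURCE B (Python) =====
-- def f(a):
--     def can(g, steps):
--         if g == 80:
--             return True
--         if steps == 0:
--             return False
--         return (can(g + 1, steps - 1)
--                 or can(g * 2, steps - 1)
--                 or can(g + g % 4, steps - 1))
--     return can(a, 5)
-- ===== Notes on version B (the rewrite author's own statement) =====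
-- stated objective: simpler
-- what changed: Replaces the level-by-level construction of the full breadth-first list with a depth-5 recursive reachability test can(g, steps) that short-circuits as soon as the target is found and keeps no container at all.
import Mathlib
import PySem

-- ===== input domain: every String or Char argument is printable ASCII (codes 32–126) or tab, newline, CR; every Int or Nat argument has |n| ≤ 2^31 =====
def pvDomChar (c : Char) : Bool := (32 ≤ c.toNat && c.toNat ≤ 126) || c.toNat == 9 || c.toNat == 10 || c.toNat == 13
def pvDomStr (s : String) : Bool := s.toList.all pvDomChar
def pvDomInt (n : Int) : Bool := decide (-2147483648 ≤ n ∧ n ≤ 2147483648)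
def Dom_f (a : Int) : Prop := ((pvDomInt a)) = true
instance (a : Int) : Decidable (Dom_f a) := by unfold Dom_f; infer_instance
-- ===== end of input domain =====

-- B replaces A's construction of the full breadth list by a depth-5 recursive
-- reachability test with early exit (objective: simpler).


-- ===== PORT A =====
def f (a : Int) : Bool :=
  let x := [a]
  let x := (PySem.List.pyRange 0 5 1).foldl (fun x _ =>
    let y : List Int := []
    let y := x.foldl (fun y g => y ++ [g + 1] ++ [g * 2] ++ [g + PySem.Int.mod g 4]) y
    x ++ y) x
  decide (80 ∈ x)

-- ===== PORT B =====
def fAltCan : Nat → Int → Bool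
  | 0, g => g == 80
  | n + 1, g =>
      if g == 80 then true
      else fAltCan n (g + 1) || fAltCan n (g * 2) || fAltCan n (g + PySem.Int.mod g 4)

def f_alt (a : Int) : Bool := fAltCan 5 a

-- ===== PRECONDITION & SPEC =====
def Spec_f (a : Int) (out : Bool) : Prop := out = f_alt a
instance (a : Int) (out : Bool) : Decidable (Spec_f a out) := by unfold Spec_f; infer_instance

-- ===== CLAIM (what is proved, stated in full; the proofs are below) =====
def Claim_equal_f : Prop := ∀ (a : Int), Dom_f a → Spec_f a (f a)

-- ===== LEMMAS AND PROOFS =====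

-- A's one round: keep the old level and append all children.
def pvStep (x : List Int) : List Int :=
  x ++ x.flatMap (fun g => [g + 1, g * 2, g + PySem.Int.mod g 4])

theorem pvInnerFold (x acc : List Int) :
    x.foldl (fun y g => y ++ [g + 1] ++ [g * 2] ++ [g + PySem.Int.mod g 4]) acc
      = acc ++ x.flatMap (fun g => [g + 1, g * 2, g + PySem.Int.mod g 4]) := by
  induction x generalizing acc with
  | nil => simp
  | cons h t ih => simp [List.foldl, List.flatMap]

theorem pvF_eq (a : Int) : f a = decide (80 ∈ pvStep^[5] [a]) := by
  have h : PySem.List.pyRange 0 5 1 = [0, 1, 2, 3, 4] := by decide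
  simp only [f, h, List.foldl, pvInnerFold, List.nil_append]
  rfl

theorem fAltCan_zero_iff (g : Int) : fAltCan 0 g = true ↔ g = 80 := by
  simp [fAltCan]

theorem fAltCan_succ_iff (n : Nat) (g : Int) :
    fAltCan (n + 1) g = true ↔
      (g = 80 ∨ fAltCan n (g + 1) = true ∨ fAltCan n (g * 2) = true
        ∨ fAltCan n (g + PySem.Int.mod g 4) = true) := by
  by_cases h : g = 80 <;> simp [fAltCan, h, or_assoc]

theorem fAltCan_80 (n : Nat) : fAltCan n 80 = true := by
  cases n with
  | zero => simp [fAltCan_zero_iff]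
  | succ m => rw [fAltCan_succ_iff]; exact Or.inl rfl

theorem fAltCan_mono (n : Nat) (g : Int) (h : fAltCan n g = true) :
    fAltCan (n + 1) g = true := by
  induction n generalizing g with
  | zero => rw [fAltCan_zero_iff] at h; rw [fAltCan_succ_iff]; exact Or.inl h
  | succ m ih =>
    rw [fAltCan_succ_iff] at h ⊢
    rcases h with h | h | h | h
    · exact Or.inl h
    · exact Or.inr (Or.inl (ih _ h))
    · exact Or.inr (Or.inr (Or.inl (ih _ h)))
    · exact Or.inr (Or.inr (Or.inr (ih _ h)))

theorem fAltCan_expand (n : Nat) (g : Int) :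
    fAltCan (n + 1) g = true ↔
      (fAltCan n g = true ∨ fAltCan n (g + 1) = true ∨ fAltCan n (g * 2) = true
        ∨ fAltCan n (g + PySem.Int.mod g 4) = true) := by
  rw [fAltCan_succ_iff]
  constructor
  · rintro (rfl | h | h | h)
    · exact Or.inl (fAltCan_80 n)
    · exact Or.inr (Or.inl h)
    · exact Or.inr (Or.inr (Or.inl h))
    · exact Or.inr (Or.inr (Or.inr h))
  · rintro (h | h | h | h)
    · cases n with
      | zero => rw [fAltCan_zero_iff] at h; exact Or.inl h
      | succ m =>
        rw [fAltCan_succ_iff] at h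
        rcases h with h | h | h | h
        · exact Or.inl h
        · exact Or.inr (Or.inl (fAltCan_mono _ _ h))
        · exact Or.inr (Or.inr (Or.inl (fAltCan_mono _ _ h)))
        · exact Or.inr (Or.inr (Or.inr (fAltCan_mono _ _ h)))
    · exact Or.inr (Or.inl h)
    · exact Or.inr (Or.inr (Or.inl h))
    · exact Or.inr (Or.inr (Or.inr h))

theorem pvKey (n : Nat) (x : List Int) :
    (80 ∈ pvStep^[n] x) ↔ ∃ g ∈ x, fAltCan n g = true := by
  induction n generalizing x with
  | zero =>
    simp only [Function.iterate_zero, id_eq, fAltCan_zero_iff]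
    exact ⟨fun h => ⟨80, h, rfl⟩, fun ⟨g, hg, he⟩ => he ▸ hg⟩
  | succ m ih =>
    rw [Function.iterate_succ_apply, ih]
    constructor
    · rintro ⟨g, hg, hc⟩
      simp only [pvStep, List.mem_append, List.mem_flatMap] at hg
      rcases hg with hg | ⟨h, hh, hmem⟩
      · exact ⟨g, hg, (fAltCan_expand m g).mpr (Or.inl hc)⟩
      · refine ⟨h, hh, (fAltCan_expand m h).mpr ?_⟩
        simp only [List.mem_cons, List.not_mem_nil, or_false] at hmem
        rcases hmem with rfl | rfl | rfl
        · exact Or.inr (Or.inl hc)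
        · exact Or.inr (Or.inr (Or.inl hc))
        · exact Or.inr (Or.inr (Or.inr hc))
    · rintro ⟨g, hg, hc⟩
      rw [fAltCan_expand] at hc
      rcases hc with h | h | h | h
      · exact ⟨g, List.mem_append.mpr (Or.inl hg), h⟩
      · refine ⟨g + 1, ?_, h⟩
        simp only [pvStep, List.mem_append, List.mem_flatMap]
        exact Or.inr ⟨g, hg, by simp⟩
      · refine ⟨g * 2, ?_, h⟩
        simp only [pvStep, List.mem_append, List.mem_flatMap]
        exact Or.inr ⟨g, hg, by simp⟩
      · refine ⟨g + PySem.Int.mod g 4, ?_, h⟩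
        simp only [pvStep, List.mem_append, List.mem_flatMap]
        exact Or.inr ⟨g, hg, by simp⟩

-- ===== VERDICT (by name: the statement is the Claim_ definition above) =====
theorem f_spec : Claim_equal_f := by
  intro a _
  unfold Spec_f f_alt
  rw [pvF_eq]
  have h := pvKey 5 [a]
  simp only [List.mem_singleton, exists_eq_left] at h
  cases hc : fAltCan 5 a with
  | true => exact decide_eq_true (h.mpr hc)
  | false => exact decide_eq_false (fun hm => by rw [h.mp hm] at hc; cases hc)
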